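-- pv_equiv track=rewrite | github.com/erberkk/python-error-agent | error_agent/tools.py | _fix_common_syntax_issues
-- ===== SOURCE A (Python) =====
-- def _fix_common_syntax_issues(code: str) -> str:
--     """Fix common syntax issues in LLM-generated code."""
--     lines = code.splitlines()
--     fixed_lines = []
--
--     for i, line in enumerate(lines):
--         fixed_lines.append(line)
--
--         # Check if current line ends with ':' (like else:, except:, etc.)
--         if line.strip().endswith(':'):
--             # Check if next line is empty or just a comment
--             next_line_idx = i + 1
--             while next_line_idx < len(lines) and not lines[next_line_idx].strip():
--                 next_line_idx += 1
--
--             if next_line_idx < len(lines):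
--                 next_line = lines[next_line_idx].strip()
--                 # If next line is just a comment, add a return statement
--                 if next_line.startswith('#') and (next_line_idx + 1 >= len(lines) or \
--                    (next_line_idx + 1 < len(lines) and not lines[next_line_idx + 1].strip())):
--                     # Get the indentation of the next line
--                     next_line_full = lines[next_line_idx]
--                     indent = len(next_line_full) - len(next_line_full.lstrip())
--                     fixed_lines.append(' ' * indent + 'return None')
--
--     return '\n'.join(fixed_lines)
-- ===== SOURCE B (Python) =====
-- def _fix_common_syntax_issues(code: str) -> str:
--     """Fix common syntax issues in LLM-generated code."""
--     lines = code.splitlines()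
--     n = len(lines)
--     # Backward pass: nxt[k] = index of nearest non-blank line at or after k (n if none).
--     nxt_rev = [n]
--     last = n
--     for i in range(n - 1, -1, -1):
--         if lines[i].strip():
--             last = i
--         nxt_rev.append(last)
--     nxt = nxt_rev[::-1]
--
--     def insertion(i, line):
--         if not line.strip().endswith(':'):
--             return []
--         j = nxt[i + 1]
--         if j >= n:
--             return []
--         nl = lines[j].strip()
--         if not nl.startswith('#'):
--             return []
--         if j + 1 < n and lines[j + 1].strip():
--             return []
--         indent = len(lines[j]) - len(lines[j].lstrip())
--         return [' ' * indent + 'return None']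
--
--     out = []
--     for i, line in enumerate(lines):
--         out.append(line)
--         out.extend(insertion(i, line))
--     return '\n'.join(out)
-- ===== Notes on version B (the rewrite author's own statement) =====
-- stated objective: alternative
-- what changed: B precomputes a nearest-non-blank-line-at-or-after index table in one backward pass and uses it as a lookup, replacing A's inner forward while-scan after every colon line, and expresses the per-line insertion as an early-return helper flat-mapped over the lines.
import Mathlib
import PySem

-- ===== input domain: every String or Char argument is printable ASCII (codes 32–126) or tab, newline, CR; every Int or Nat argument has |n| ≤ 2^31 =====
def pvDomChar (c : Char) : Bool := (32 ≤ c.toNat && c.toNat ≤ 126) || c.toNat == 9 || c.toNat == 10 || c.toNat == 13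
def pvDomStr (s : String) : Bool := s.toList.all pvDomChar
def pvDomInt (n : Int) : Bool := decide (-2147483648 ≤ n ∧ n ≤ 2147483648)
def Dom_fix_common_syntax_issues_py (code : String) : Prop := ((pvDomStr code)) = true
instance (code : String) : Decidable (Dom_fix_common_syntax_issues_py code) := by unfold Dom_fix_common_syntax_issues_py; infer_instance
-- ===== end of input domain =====

-- B replaces A's inner forward while-scan by a table of nearest-non-blank indices built in one
-- backward pass, and the per-line conditional append by an early-return insertion helper (objective: alternative).

-- ===== PORT A =====
-- A's inner while loop: first index j' ≥ j with a non-blank line (lines.length if none).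
def pvScanA (lines : List String) (j : Nat) : Nat :=
  if h : j < lines.length then
    if PySem.Str.strip lines[j] = "" then pvScanA lines (j + 1) else j
  else j
termination_by lines.length - j

-- A's main for-loop over enumerate(lines), as structural recursion on the index.
def pvLoopA (lines : List String) (i : Nat) (acc : List String) : List String :=
  if h : i < lines.length then
    let line := lines[i]
    let acc1 := acc ++ [line]
    let acc2 :=
      if PySem.Str.endswith (PySem.Str.strip line) ":" then
        let j := pvScanA lines (i + 1)
        if hj : j < lines.length then
          let nl := PySem.Str.strip lines[j]
          if PySem.Str.startswith nl "#" ∧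
             (j + 1 ≥ lines.length ∨ (j + 1 < lines.length ∧ PySem.Str.strip (lines.getD (j + 1) "") = "")) then
            let full := lines[j]
            let indent := PySem.Str.len full - PySem.Str.len (PySem.Str.lstrip full)
            acc1 ++ [String.mk (List.replicate indent.toNat ' ' ++ "return None".toList)]
          else acc1
        else acc1
      else acc1
    pvLoopA lines (i + 1) acc2
  else acc
termination_by lines.length - i

def fix_common_syntax_issues_py (code : String) : String :=
  let lines := PySem.Str.splitlines code
  PySem.Str.join "\n" (pvLoopA lines 0 [])

-- ===== PORT B =====
-- B's insertion helper: the early-return chain deciding what (if anything) follows line i.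
def pvInsB (lines : List String) (nxt : List Nat) (i : Nat) (line : String) : List String :=
  if ¬ PySem.Str.endswith (PySem.Str.strip line) ":" then []
  else
    let j := nxt.getD (i + 1) lines.length
    if j ≥ lines.length then []
    else
      let nl := PySem.Str.strip (lines.getD j "")
      if ¬ PySem.Str.startswith nl "#" then []
      else if j + 1 < lines.length ∧ PySem.Str.strip (lines.getD (j + 1) "") ≠ "" then []
      else
        let indent := PySem.Str.len (lines.getD j "") - PySem.Str.len (PySem.Str.lstrip (lines.getD j ""))
        [String.mk (List.replicate indent.toNat ' ' ++ "return None".toList)]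

-- B's backward pass carrying the last-seen non-blank index, then reversed.
def pvNxtB (lines : List String) : List Nat :=
  let n := lines.length
  let p := (List.range n).reverse.foldl
    (fun (st : Nat × List Nat) i =>
      let last := if PySem.Str.strip (lines.getD i "") ≠ "" then i else st.1
      (last, st.2 ++ [last]))
    (n, [n])
  p.2.reverse

def fix_common_syntax_issues_py_alt (code : String) : String :=
  let lines := PySem.Str.splitlines code
  let nxt := pvNxtB lines
  PySem.Str.join "\n"
    ((List.range lines.length).flatMap (fun i => lines.getD i "" :: pvInsB lines nxt i (lines.getD i "")))

-- ===== PRECONDITION & SPEC =====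
def Spec_fix_common_syntax_issues_py (code : String) (out : String) : Prop := out = fix_common_syntax_issues_py_alt code
instance (code : String) (out : String) : Decidable (Spec_fix_common_syntax_issues_py code out) := by unfold Spec_fix_common_syntax_issues_py; infer_instance

-- ===== CLAIM (what is proved, stated in full; the proofs are below) =====
def Claim_equal_fix_common_syntax_issues_py : Prop := ∀ (code : String), Dom_fix_common_syntax_issues_py code → Spec_fix_common_syntax_issues_py code (fix_common_syntax_issues_py code)

-- ===== LEMMAS AND PROOFS =====

-- The backward fold, run from index j down to 0 on a state already holding the answers for j..n,
-- produces the answers for 0..n (stored reversed).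
theorem pvNxt_fold_spec (lines : List String) (j : Nat) (hj : j ≤ lines.length) :
    (List.range j).reverse.foldl
      (fun (st : Nat × List Nat) i =>
        let last := if PySem.Str.strip (lines.getD i "") ≠ "" then i else st.1
        (last, st.2 ++ [last]))
      (pvScanA lines j,
        ((List.range' j (lines.length + 1 - j)).map (pvScanA lines)).reverse)
    = (pvScanA lines 0,
        ((List.range' 0 (lines.length + 1)).map (pvScanA lines)).reverse) := by
  induction j with
  | zero => simp
  | succ j ih =>
    have hjlt : j < lines.length := hj
    have hrange : (List.range (j + 1)).reverse = j :: (List.range j).reverse := by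
      simp [List.range_succ]
    have hscan : pvScanA lines j =
        (if PySem.Str.strip (lines.getD j "") ≠ "" then j else pvScanA lines (j + 1)) := by
      rw [pvScanA]
      simp only [hjlt, dif_pos, List.getD_eq_getElem _ _ hjlt]
      by_cases hb : PySem.Str.strip lines[j] = "" <;> simp [hb]
    have hlist : ((List.range' (j + 1) (lines.length + 1 - (j + 1))).map (pvScanA lines)).reverse
        ++ [pvScanA lines j]
        = ((List.range' j (lines.length + 1 - j)).map (pvScanA lines)).reverse := by
      have h1 : List.range' j (lines.length + 1 - j) = j :: List.range' (j + 1) (lines.length + 1 - (j + 1)) := by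
        have h2 : lines.length + 1 - j = (lines.length + 1 - (j + 1)) + 1 := by omega
        rw [h2, List.range'_succ]
      rw [h1]; simp
    rw [hrange, List.foldl_cons]
    dsimp only
    rw [← hscan, hlist]
    exact ih (by omega)

theorem pvNxtB_eq (lines : List String) :
    pvNxtB lines = (List.range (lines.length + 1)).map (pvScanA lines) := by
  have h0 : pvScanA lines lines.length = lines.length := by
    rw [pvScanA]; simp
  have hinit : ((List.range' lines.length (lines.length + 1 - lines.length)).map (pvScanA lines)).reverse
      = [lines.length] := by
    have h1 : lines.length + 1 - lines.length = 1 := by omega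
    simp [h1, List.range'_one, h0]
  have hmain := pvNxt_fold_spec lines lines.length (le_refl _)
  rw [hinit, h0] at hmain
  unfold pvNxtB
  dsimp only
  rw [hmain]
  simp [List.range_eq_range']

theorem pvNxt_getD (lines : List String) (k : Nat) (hk : k < lines.length + 1) :
    (pvNxtB lines).getD k lines.length = pvScanA lines k := by
  rw [pvNxtB_eq]
  have hlen : k < ((List.range (lines.length + 1)).map (pvScanA lines)).length := by
    simpa using hk
  rw [List.getD_eq_getElem _ _ hlen]
  simp

-- B's insertion helper written in A's conditional shape.
theorem pvInsB_spec (lines : List String) (i : Nat) (h : i < lines.length) :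
    pvInsB lines (pvNxtB lines) i lines[i] =
      (if PySem.Str.endswith (PySem.Str.strip lines[i]) ":" then
        (if hj : pvScanA lines (i + 1) < lines.length then
          (if PySem.Str.startswith (PySem.Str.strip lines[pvScanA lines (i + 1)]) "#" ∧
              (pvScanA lines (i + 1) + 1 ≥ lines.length ∨ (pvScanA lines (i + 1) + 1 < lines.length ∧
                PySem.Str.strip (lines.getD (pvScanA lines (i + 1) + 1) "") = "")) then
            [String.mk (List.replicate (PySem.Str.len lines[pvScanA lines (i + 1)] -
              PySem.Str.len (PySem.Str.lstrip lines[pvScanA lines (i + 1)])).toNat ' ' ++ "return None".toList)]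
          else [])
        else [])
      else []) := by
  unfold pvInsB
  rw [pvNxt_getD lines (i + 1) (by omega)]
  by_cases hc : PySem.Str.endswith (PySem.Str.strip lines[i]) ":" = true
  · rw [if_neg (not_not_intro hc), if_pos hc]
    by_cases hjl : pvScanA lines (i + 1) < lines.length
    · have hgj : lines.getD (pvScanA lines (i + 1)) "" = lines[pvScanA lines (i + 1)] :=
        List.getD_eq_getElem _ _ hjl
      rw [dif_pos hjl, if_neg (by omega : ¬ pvScanA lines (i + 1) ≥ lines.length), hgj]
      by_cases hs : PySem.Str.startswith (PySem.Str.strip lines[pvScanA lines (i + 1)]) "#" = true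
      · by_cases h2 : pvScanA lines (i + 1) + 1 < lines.length
        · by_cases h3 : PySem.Str.strip (lines.getD (pvScanA lines (i + 1) + 1) "") = ""
          · rw [if_neg (not_not_intro hs), if_neg (by
              rintro ⟨-, hbad⟩
              exact hbad h3), if_pos ⟨hs, Or.inr ⟨h2, h3⟩⟩]
          · rw [if_neg (not_not_intro hs), if_pos ⟨h2, h3⟩, if_neg (by
              rintro ⟨-, (hbad | ⟨-, hbad⟩)⟩
              · omega
              · exact h3 hbad)]
        · rw [if_neg (not_not_intro hs), if_neg (fun hp => h2 hp.1),
            if_pos ⟨hs, Or.inl (by omega)⟩]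
      · rw [if_pos hs, if_neg (fun hp => hs hp.1)]
    · rw [dif_neg hjl, if_pos (by omega : pvScanA lines (i + 1) ≥ lines.length)]
  · rw [if_pos hc, if_neg hc]

-- A's loop, related to B's flatMap over the remaining indices.
set_option maxHeartbeats 1600000 in
theorem pvLoopA_eq (lines : List String) (i : Nat) (acc : List String) :
    pvLoopA lines i acc
      = acc ++ (List.range' i (lines.length - i)).flatMap
          (fun k => lines.getD k "" :: pvInsB lines (pvNxtB lines) k (lines.getD k "")) := by
  by_cases h : i < lines.length
  · have hrange : List.range' i (lines.length - i)
        = i :: List.range' (i + 1) (lines.length - (i + 1)) := by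
      have h1 : lines.length - i = (lines.length - (i + 1)) + 1 := by omega
      rw [h1, List.range'_succ]
    have hget : lines.getD i "" = lines[i] := List.getD_eq_getElem _ _ h
    rw [pvLoopA]
    simp only [h, dif_pos]
    rw [pvLoopA_eq lines (i + 1)]
    rw [hrange, List.flatMap_cons, ← List.append_assoc]
    congr 1
    rw [hget, pvInsB_spec lines i h]
    split_ifs <;> simp
  · rw [pvLoopA]
    simp only [h, dif_neg, not_false_iff]
    have h0 : lines.length - i = 0 := by omega
    simp [h0]
termination_by lines.length - i

-- ===== VERDICT (by name: the statement is the Claim_ definition above) =====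
theorem fix_common_syntax_issues_py_spec : Claim_equal_fix_common_syntax_issues_py := by
  intro code _
  unfold Spec_fix_common_syntax_issues_py fix_common_syntax_issues_py fix_common_syntax_issues_py_alt
  simp only []
  rw [pvLoopA_eq]
  simp [List.range_eq_range']
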